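-- pv_equiv track=rewrite | github.com/J-Enblom/Advent-of-Code | 2024/05.py | parse
-- ===== SOURCE A (Python) =====
-- def parse(data):
--     rules = []
--     orders = []
--     flag = True
--     for line in data:
--         if line == "":
--             flag = False
--             continue
--         if flag:
--             rules.append(line)
--         else:
--             orders.append(line.split(","))
--
--     return rules, orders
-- ===== SOURCE B (Python) =====
-- def parse(data):
--     try:
--         i = data.index("")
--     except ValueError:
--         i = len(data)
--     rules = data[:i]
--     orders = [line.split(",") for line in data[i + 1:] if line != ""]
--     return rules, orders
-- ===== Notes on version B (the rewrite author's own statement) =====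
-- stated objective: simpler
-- what changed: Instead of a stateful flag loop, B locates the first blank line once and builds rules from the leading slice and orders by a filtered comprehension over the trailing slice.
import Mathlib
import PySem

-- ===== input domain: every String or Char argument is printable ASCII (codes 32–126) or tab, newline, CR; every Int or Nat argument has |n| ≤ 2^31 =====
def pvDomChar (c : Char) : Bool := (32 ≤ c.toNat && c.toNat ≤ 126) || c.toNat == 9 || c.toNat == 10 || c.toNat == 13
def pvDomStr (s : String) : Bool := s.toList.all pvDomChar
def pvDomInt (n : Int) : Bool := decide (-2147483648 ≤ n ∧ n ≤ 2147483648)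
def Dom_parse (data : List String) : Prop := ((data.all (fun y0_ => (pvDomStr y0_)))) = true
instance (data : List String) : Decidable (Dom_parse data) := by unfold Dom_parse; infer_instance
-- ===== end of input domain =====

-- B replaces A's stateful flag loop by locating the first blank line once and slicing; objective: simpler.

-- ===== PORT A =====
-- line.split(","): sep is non-empty so split? is always `some`
def splitComma (line : String) : List String := (PySem.Str.split? line ",").getD []

-- A's for-loop over `data` with accumulators `rules`, `orders` and the flag:
def parseLoop (lines : List String) (rules : List String)
    (orders : List (List String)) (flag : Bool) : List String × List (List String) :=
  match lines with
  | [] => (rules, orders)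
  | line :: rest =>
    if line == "" then parseLoop rest rules orders false
    else if flag then parseLoop rest (rules ++ [line]) orders flag
    else parseLoop rest rules (orders ++ [splitComma line]) flag

def parse (data : List String) : List String × List (List String) :=
  parseLoop data [] [] true

-- ===== PORT B =====
def parse_alt (data : List String) : List String × List (List String) :=
  let i := data.findIdx (· == "")      -- data.index("") with len(data) fallback
  (data.take i,
   ((data.drop (i + 1)).filter (fun line => line != "")).map
     splitComma)

-- ===== PRECONDITION & SPEC =====
def Spec_parse (data : List String) (out : List String × List (List String)) : Prop := out = parse_alt data
instance (data : List String) (out : List String × List (List String)) : Decidable (Spec_parse data out) := by unfold Spec_parse; infer_instance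

-- ===== CLAIM (what is proved, stated in full; the proofs are below) =====
def Claim_equal_parse : Prop := ∀ (data : List String), Dom_parse data → Spec_parse data (parse data)

-- ===== LEMMAS AND PROOFS =====
theorem parseLoop_false (lines : List String) :
    ∀ rules orders, parseLoop lines rules orders false =
      (rules, orders ++ (lines.filter (fun l => l != "")).map (fun l => splitComma l)) := by
  induction lines with
  | nil => intro rules orders; simp [parseLoop]
  | cons h t ih =>
    intro rules orders
    by_cases hh : h = ""
    · subst hh; simp [parseLoop, ih]
    · simp [parseLoop, hh, ih]

theorem parseLoop_true (lines : List String) :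
    ∀ rules orders, parseLoop lines rules orders true =
      (rules ++ lines.take (lines.findIdx (· == "")),
       orders ++ ((lines.drop (lines.findIdx (· == "") + 1)).filter (fun l => l != "")).map
         (fun l => splitComma l)) := by
  induction lines with
  | nil => intro rules orders; simp [parseLoop]
  | cons h t ih =>
    intro rules orders
    by_cases hh : h = ""
    · subst hh
      simp [parseLoop, List.findIdx_cons, parseLoop_false]
    · have hb : (h == "") = false := by simp [hh]
      simp [parseLoop, hb, List.findIdx_cons, ih]

-- ===== VERDICT (by name: the statement is the Claim_ definition above) =====
theorem parse_spec : Claim_equal_parse := by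
  intro data _
  unfold Spec_parse parse parse_alt
  simp [parseLoop_true]
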